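-- pv_equiv track=rewrite | github.com/CharlesFee/CS115-Code | 9-12-18.py | divisibles
-- ===== SOURCE A (Python) =====
-- def divides(n):
--     'checks if there is a remainder'
--     def div(k):
--
--         return n % k == 0
--
--     return div
--
-- def divisibles(n,L):
--     'assume L is a list of integers; return a list of the one divisible by n'
--     if L==[]:
--         return []
--     else:
--         if divides(L[0])(n):
--             return [L[0]] + divisibles(n, L[1:])
--         else:
--             return divisibles(n,L[1:])
-- ===== SOURCE B (Python) =====
-- def divisibles(n, L):
--     'assume L is a list of integers; return a list of the one divisible by n'
--     out = []
--     for x in L: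
--         if x % n == 0:
--             out.append(x)
--     return out
-- ===== Notes on version B (the rewrite author's own statement) =====
-- stated objective: faster
-- what changed: Replaced head/tail recursion with repeated slicing and list concatenation by a single iterative loop maintaining an accumulator list.
import Mathlib
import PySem

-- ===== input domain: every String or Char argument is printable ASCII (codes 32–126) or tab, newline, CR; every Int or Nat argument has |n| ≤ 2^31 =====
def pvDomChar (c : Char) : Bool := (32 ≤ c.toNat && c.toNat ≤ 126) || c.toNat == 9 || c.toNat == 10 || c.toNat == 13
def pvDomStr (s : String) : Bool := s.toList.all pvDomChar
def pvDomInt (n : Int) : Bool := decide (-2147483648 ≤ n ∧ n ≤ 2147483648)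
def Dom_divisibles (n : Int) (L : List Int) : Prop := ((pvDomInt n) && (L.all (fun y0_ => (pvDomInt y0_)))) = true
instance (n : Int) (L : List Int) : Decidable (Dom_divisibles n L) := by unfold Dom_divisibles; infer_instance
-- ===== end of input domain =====

-- B replaces A's head/tail recursion with slicing by one iterative loop with an accumulator (faster; no repeated slicing/concatenation).

-- ===== PORT A =====
def divisibles (n : Int) (L : List Int) : List Int :=
  match L with
  | [] => []
  | x :: t =>
    if PySem.Int.mod x n = 0 then [x] ++ divisibles n t
    else divisibles n t

-- ===== PORT B =====
def divisibles_alt (n : Int) (L : List Int) : List Int :=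
  L.foldl (fun out x => if PySem.Int.mod x n = 0 then out ++ [x] else out) []

-- ===== PRECONDITION & SPEC =====
-- Pre_ excludes n = 0 with a nonempty list: there Python's `x % 0` raises ZeroDivisionError in both programs.
def Pre_divisibles (n : Int) (L : List Int) : Prop := L = [] ∨ n ≠ 0
instance (n : Int) (L : List Int) : Decidable (Pre_divisibles n L) := by unfold Pre_divisibles; infer_instance
def pvWitness_divisibles : Int × List Int := (3, [3, 4, 6, -9, 0])
def Spec_divisibles (n : Int) (L : List Int) (out : List Int) : Prop := out = divisibles_alt n L
instance (n : Int) (L : List Int) (out : List Int) : Decidable (Spec_divisibles n L out) := by unfold Spec_divisibles; infer_instance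

-- ===== CLAIM (what is proved, stated in full; the proofs are below) =====
def Claim_equal_divisibles : Prop := ∀ (n : Int) (L : List Int), Dom_divisibles n L → Pre_divisibles n L → Spec_divisibles n L (divisibles n L)

-- ===== LEMMAS AND PROOFS =====
theorem divisibles_foldl_acc (n : Int) (L : List Int) (acc : List Int) :
    L.foldl (fun out x => if PySem.Int.mod x n = 0 then out ++ [x] else out) acc
      = acc ++ divisibles n L := by
  induction L generalizing acc with
  | nil => simp [divisibles]
  | cons x t ih =>
    simp only [List.foldl, divisibles]
    by_cases h : PySem.Int.mod x n = 0 <;> simp [h, ih]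

-- ===== VERDICT (by name: the statement is the Claim_ definition above) =====
theorem divisibles_spec : Claim_equal_divisibles := by
  intro n L _ _
  unfold Spec_divisibles divisibles_alt
  rw [divisibles_foldl_acc]
  simp
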